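-- pv_equiv track=rewrite | github.com/cdgtlmda/HavenHealthPassport | src/translation/text_direction/bidi_algorithm.py | _reorder_text
-- ===== SOURCE A (Python) =====
-- from typing import List, Tuple
--
-- def _reorder_text(
--     text: str, runs: List[Tuple[int, int, int]], levels: List[int]
-- ) -> str:
--     """
--     Reorder text based on embedding levels (L1-L4 of UBA).
--
--     Args:
--         text: Original text
--         runs: Directional runs identified
--         levels: Embedding levels for each character
--
--     Returns:
--         Reordered text
--     """
--     # Find highest level
--     max_level = max(levels)
--
--     # Process from highest level to lowest
--     text_array = list(text)
--
--     for level in range(max_level, -1, -1):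
--         # Find runs at this level
--         for start, end, run_level in runs:
--             if run_level >= level:
--                 # Reverse RTL runs (odd levels)
--                 if level % 2 == 1:
--                     text_array[start : end + 1] = text_array[start : end + 1][::-1]
--
--     return "".join(text_array)
-- ===== SOURCE B (Python) =====
-- from typing import List, Tuple
--
-- def _reorder_text(
--     text: str, runs: List[Tuple[int, int, int]], levels: List[int]
-- ) -> str:
--     # Never touch the text until the end: record each slice reversal as a clamped
--     # interval, then compute every output character's source position by pure index
--     # arithmetic (a flip s..e maps j to s+e-1-j), composing the flips per position.
--     max_level = max(levels)
--     n = len(text)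
--
--     def clamp(i):
--         if i < 0:
--             i += n
--         return 0 if i < 0 else (n if i > n else i)
--
--     flips = []
--     start_level = max_level if max_level % 2 == 1 else max_level - 1
--     for level in range(start_level, 0, -2):   # even levels reverse nothing
--         for start, end, run_level in runs:
--             if run_level >= level:
--                 flips.append((clamp(start), clamp(end + 1)))
--
--     out = []
--     for i in range(n):
--         j = i
--         for s, e in reversed(flips):   # the first-applied flip acts last on the index
--             if s <= j < e:
--                 j = s + e - 1 - j
--         out.append(text[j])
--     return "".join(out)
-- ===== Notes on version B (the rewrite author's own statement) =====
-- stated objective: alternative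
-- what changed: B never rewrites the character array: it records each would-be slice reversal as a clamped interval (skipping the even levels, which reverse nothing) and computes every output character's source position by composing the interval flips with pure index arithmetic; it trades A's repeated slice copying for per-position arithmetic, so it does the same number of elementary steps but with a larger interpreted-loop constant.
import Mathlib
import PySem

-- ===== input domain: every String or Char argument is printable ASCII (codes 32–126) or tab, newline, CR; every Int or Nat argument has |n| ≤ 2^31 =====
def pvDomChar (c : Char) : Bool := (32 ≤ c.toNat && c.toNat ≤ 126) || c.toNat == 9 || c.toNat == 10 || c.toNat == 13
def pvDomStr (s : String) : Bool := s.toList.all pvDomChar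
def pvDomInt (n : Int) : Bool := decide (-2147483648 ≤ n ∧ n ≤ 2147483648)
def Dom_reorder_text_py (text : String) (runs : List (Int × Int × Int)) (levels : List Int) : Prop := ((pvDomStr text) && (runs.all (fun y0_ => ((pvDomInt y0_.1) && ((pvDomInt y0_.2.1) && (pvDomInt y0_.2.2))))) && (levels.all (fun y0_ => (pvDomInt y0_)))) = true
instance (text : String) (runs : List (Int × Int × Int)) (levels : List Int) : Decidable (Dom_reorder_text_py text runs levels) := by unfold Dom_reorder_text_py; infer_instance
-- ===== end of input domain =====

-- B never rewrites the character array: it records each would-be slice reversal as a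
-- clamped interval and computes every output character's source position by pure index
-- arithmetic, composing the interval flips per position (objective: alternative).

-- ===== PORT A =====
-- Python slice assignment `xs[a:b] = xs[a:b][::-1]` (the replacement has the slice's own
-- length): exact hand port — prefix up to the clamped start, the reversed slice, then the
-- suffix from max(clamped start, clamped stop), exactly Python's replaced region.
def pyRevSlice {α : Type} (xs : List α) (a b : Int) : List α :=
  let s := PySem.List.clampIdx xs.length a
  let e := PySem.List.clampIdx xs.length b
  xs.take s ++ (PySem.List.slice xs (some a) (some b)).reverse ++ xs.drop (max s e)

-- A's inner `for start, end, run_level in runs:` loop at one level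
def reorderLoopA (runs : List (Int × Int × Int)) (level : Int) (arr : List Char) : List Char :=
  runs.foldl
    (fun arr r =>
      if r.2.2 ≥ level then
        if PySem.Int.mod level 2 = 1 then pyRevSlice arr r.1 (r.2.1 + 1) else arr
      else arr)
    arr

def reorder_text_py (text : String) (runs : List (Int × Int × Int)) (levels : List Int) : String :=
  match PySem.List.max? levels id with
  | none => ""   -- max([]) raises ValueError: excluded by Pre_
  | some maxLevel =>
    let arr := (PySem.List.pyRange maxLevel (-1) (-1)).foldl
      (fun arr level => reorderLoopA runs level arr) text.toList
    String.ofList arr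

-- ===== PORT B =====
-- Source B's `if s <= j < e: j = s + e - 1 - j` applied to index j
def flipIdx (s e j : Nat) : Nat := if s ≤ j ∧ j < e then s + e - 1 - j else j

-- Source B's flip-collection loops: `for level in range(start_level, 0, -2): for start, end,
-- run_level in runs: if run_level >= level: flips.append((clamp(start), clamp(end+1)))`;
-- Source B's `clamp` is exactly Python's slice-bound clamping, i.e. PySem.List.clampIdx.
def collectFlips (n : Nat) (runs : List (Int × Int × Int)) (startLevel : Int) : List (Nat × Nat) :=
  (PySem.List.pyRange startLevel 0 (-2)).foldl
    (fun acc level => runs.foldl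
      (fun acc r =>
        if r.2.2 ≥ level then
          acc ++ [(PySem.List.clampIdx n r.1, PySem.List.clampIdx n (r.2.1 + 1))]
        else acc)
      acc)
    []

def reorder_text_py_alt (text : String) (runs : List (Int × Int × Int)) (levels : List Int) : String :=
  match PySem.List.max? levels id with
  | none => ""   -- max([]) raises ValueError: excluded by Pre_
  | some maxLevel =>
    let n := text.toList.length
    let startLevel := if PySem.Int.mod maxLevel 2 = 1 then maxLevel else maxLevel - 1
    let flips := collectFlips n runs startLevel
    -- `for s, e in reversed(flips): j = flip(j)` then `out.append(text[j])`; the flips keep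
    -- j inside [0, n), so `text[j]` is getD with an in-range index (default never used).
    String.ofList ((List.range n).map (fun i =>
      text.toList.getD (flips.reverse.foldl (fun j se => flipIdx se.1 se.2 j) i) ' '))

-- ===== PRECONDITION & SPEC =====
-- Pre_ excludes only the empty levels list, on which A's `max(levels)` raises ValueError.
def Pre_reorder_text_py (text : String) (runs : List (Int × Int × Int)) (levels : List Int) : Prop := levels ≠ []
instance (text : String) (runs : List (Int × Int × Int)) (levels : List Int) : Decidable (Pre_reorder_text_py text runs levels) := by unfold Pre_reorder_text_py; infer_instance

def pvWitness_reorder_text_py : String × (List (Int × Int × Int)) × List Int :=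
  ("abcde", [(0, 2, 1), (3, 4, 2)], [1, 1, 1, 2, 2])

def Spec_reorder_text_py (text : String) (runs : List (Int × Int × Int)) (levels : List Int) (out : String) : Prop := out = reorder_text_py_alt text runs levels
instance (text : String) (runs : List (Int × Int × Int)) (levels : List Int) (out : String) : Decidable (Spec_reorder_text_py text runs levels out) := by unfold Spec_reorder_text_py; infer_instance

-- ===== CLAIM (what is proved, stated in full; the proofs are below) =====
def Claim_equal_reorder_text_py : Prop := ∀ (text : String) (runs : List (Int × Int × Int)) (levels : List Int), Dom_reorder_text_py text runs levels → Pre_reorder_text_py text runs levels → Spec_reorder_text_py text runs levels (reorder_text_py text runs levels)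

-- ===== LEMMAS AND PROOFS =====

-- max(nonempty) returns a value
theorem max?_cons_isSome (x : Int) (levels : List Int) :
    (PySem.List.max? (x :: levels) id).isSome := by
  unfold PySem.List.max?
  simp only [List.foldl_cons]
  show (List.foldl _ (some x) levels).isSome
  induction levels generalizing x with
  | nil => rfl
  | cons y ys ih =>
    simp only [List.foldl_cons]
    show (List.foldl _ (if id x < id y then some y else some x) ys).isSome
    split
    · exact ih y
    · exact ih x

-- range(a, b, -2) unfolding
theorem pyRange_neg_two_nil (a b : Int) (h : a ≤ b) : PySem.List.pyRange a b (-2) = [] := by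
  simp [PySem.List.pyRange, show ¬ b < a by omega]

theorem pyRange_neg_two_cons (a b : Int) (h : b < a) :
    PySem.List.pyRange a b (-2) = a :: PySem.List.pyRange (a - 2) b (-2) := by
  simp only [PySem.List.pyRange, show ¬(-2 : Int) = 0 by decide, if_false,
    show ¬(0:Int) < -2 by decide, if_true, h, show (- -2 : Int) = 2 by norm_num]
  by_cases h2 : b < a - 2
  · simp only [h2, if_true]
    have hC : ((a - b + 2 - 1) / 2 : Int).toNat = ((a - 2 - b + 2 - 1) / 2 : Int).toNat + 1 := by
      omega
    rw [hC, List.range_succ_eq_map, List.map_cons, List.map_map]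
    refine List.cons_eq_cons.mpr ⟨by norm_num, ?_⟩
    apply List.map_congr_left
    intro k _
    simp
    ring
  · simp only [h2, if_false]
    have hC : ((a - b + 2 - 1) / 2 : Int).toNat = 1 := by omega
    simp [hC, List.range_succ]

-- at an even level A's inner loop reverses nothing
theorem reorderLoopA_even (runs : List (Int × Int × Int)) (level : Int) (arr : List Char)
    (h : ¬ PySem.Int.mod level 2 = 1) : reorderLoopA runs level arr = arr := by
  induction runs generalizing arr with
  | nil => rfl
  | cons r rs ih =>
    simp only [reorderLoopA, List.foldl_cons] at *
    rw [if_neg h, ite_self, ih]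

-- at an odd level A's inner loop reverses every qualifying run
theorem reorderLoopA_odd (runs : List (Int × Int × Int)) (level : Int) (arr : List Char)
    (h : PySem.Int.mod level 2 = 1) :
    reorderLoopA runs level arr =
      runs.foldl (fun a r => if r.2.2 ≥ level then pyRevSlice a r.1 (r.2.1 + 1) else a) arr := by
  induction runs generalizing arr with
  | nil => rfl
  | cons r rs ih =>
    simp only [reorderLoopA, List.foldl_cons] at *
    rw [if_pos h, ih]

-- A's descending pass over range(max_level, -1, -1) is the pass over the odd levels only
theorem fold_all_levels_eq_fold_odd (runs : List (Int × Int × Int)) :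
    ∀ (k : Nat) (m : Int), (m + 1).toNat = k → ∀ (arr : List Char),
      (PySem.List.pyRange m (-1) (-1)).foldl (fun a l => reorderLoopA runs l a) arr
        = (PySem.List.pyRange (if PySem.Int.mod m 2 = 1 then m else m - 1) 0 (-2)).foldl
            (fun a l =>
              runs.foldl (fun a r => if r.2.2 ≥ l then pyRevSlice a r.1 (r.2.1 + 1) else a) a)
            arr := by
  intro k
  induction k with
  | zero =>
    intro m hm arr
    have hm' : m ≤ -1 := by omega
    rw [PySem.List.pyRange_neg_one_eq_nil hm', pyRange_neg_two_nil]
    · rfl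
    · split <;> omega
  | succ k ih =>
    intro m hm arr
    have hm0 : 0 ≤ m := by omega
    have hmod := PySem.Int.mod_eq_emod_of_pos (a := m) (b := 2) (by norm_num)
    have hmod' := PySem.Int.mod_eq_emod_of_pos (a := m - 1) (b := 2) (by norm_num)
    rw [PySem.List.pyRange_neg_one_cons (by omega), List.foldl_cons]
    by_cases hodd : PySem.Int.mod m 2 = 1
    · have hmpos : 0 < m := by omega
      have hne : ¬ PySem.Int.mod (m - 1) 2 = 1 := by omega
      rw [reorderLoopA_odd runs m arr hodd, ih (m - 1) (by omega), if_neg hne,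
        if_pos hodd, pyRange_neg_two_cons m 0 hmpos, List.foldl_cons,
        show m - 1 - 1 = m - 2 by ring]
    · have h1 : PySem.Int.mod (m - 1) 2 = 1 := by omega
      rw [reorderLoopA_even runs m arr hodd, ih (m - 1) (by omega), if_pos h1, if_neg hodd]

-- one slice reversal with already-clamped Nat bounds
def applyFlip (xs : List Char) (se : Nat × Nat) : List Char :=
  xs.take se.1 ++ ((xs.drop se.1).take (se.2 - se.1)).reverse ++ xs.drop (max se.1 se.2)

theorem pyRevSlice_eq_applyFlip (xs : List Char) (a b : Int) :
    pyRevSlice xs a b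
      = applyFlip xs (PySem.List.clampIdx xs.length a, PySem.List.clampIdx xs.length b) := rfl

-- the identity permutation gathers the list back
theorem range_map_getD (l : List Char) :
    (List.range l.length).map (fun i => l.getD i ' ') = l := by
  apply List.ext_getElem
  · simp
  · intro i h1 h2
    simp [List.getD_eq_getElem?_getD, List.getElem?_eq_getElem h2]

-- one flip, as a gather by index arithmetic
theorem applyFlip_eq_map (xs : List Char) (s e : Nat) (hs : s ≤ xs.length)
    (he : e ≤ xs.length) :
    applyFlip xs (s, e)
      = (List.range xs.length).map (fun j => xs.getD (flipIdx s e j) ' ') := by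
  apply List.ext_getElem?
  intro j
  by_cases hj : j < xs.length
  case neg =>
    rw [List.getElem?_eq_none (by simp [applyFlip]; omega),
      List.getElem?_eq_none (by simp; omega)]
  case pos =>
  rw [List.getElem?_map, List.getElem?_range hj, Option.map_some]
  by_cases hse : e ≤ s
  · have h0 : e - s = 0 := by omega
    have hm : max s e = s := by omega
    simp only [applyFlip, h0, hm, List.take_zero, List.reverse_nil, List.append_nil, List.take_append_drop]
    have hf : flipIdx s e j = j := by unfold flipIdx; rw [if_neg (by omega)]
    rw [hf, List.getD_eq_getElem?_getD, List.getElem?_eq_getElem hj]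
    rfl
  · have hse' : s < e := by omega
    have hm : max s e = e := by omega
    have hlen1 : (xs.take s).length = s := by simp; omega
    have hlen2 : ((xs.drop s).take (e - s)).reverse.length = e - s := by simp; omega
    simp only [applyFlip, hm, List.append_assoc, List.getElem?_append, hlen1, hlen2]
    by_cases h1 : j < s
    · rw [if_pos h1, List.getElem?_take, if_pos h1, List.getElem?_eq_getElem (by omega)]
      have hf : flipIdx s e j = j := by unfold flipIdx; rw [if_neg (by omega)]
      rw [hf, List.getD_eq_getElem?_getD, List.getElem?_eq_getElem (by omega)]
      rfl
    · rw [if_neg h1]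
      by_cases h2 : j < e
      · rw [if_pos (by omega),
          List.getElem?_reverse (by simp; omega), List.length_take, List.length_drop,
          List.getElem?_take, if_pos (by omega), List.getElem?_drop]
        have hf : flipIdx s e j = s + e - 1 - j := by unfold flipIdx; rw [if_pos (by omega)]
        have hidx : s + (min (e - s) (xs.length - s) - 1 - (j - s)) = s + e - 1 - j := by omega
        rw [hidx, List.getElem?_eq_getElem (by omega), hf,
          List.getD_eq_getElem?_getD, List.getElem?_eq_getElem (by omega)]
        rfl
      · rw [if_neg (by omega), List.getElem?_drop]
        have hidx : e + (j - s - (e - s)) = j := by omega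
        have hf : flipIdx s e j = j := by unfold flipIdx; rw [if_neg (by omega)]
        rw [hidx, hf, List.getElem?_eq_getElem hj, List.getD_eq_getElem?_getD,
          List.getElem?_eq_getElem hj]
        rfl

theorem length_applyFlip (xs : List Char) (s e : Nat) (hs : s ≤ xs.length)
    (he : e ≤ xs.length) : (applyFlip xs (s, e)).length = xs.length := by
  rw [applyFlip_eq_map xs s e hs he]; simp

-- pointwise getD form of one flip (total in the index)
theorem getD_applyFlip (xs : List Char) (s e : Nat) (hs : s ≤ xs.length)
    (he : e ≤ xs.length) (k : Nat) :
    (applyFlip xs (s, e)).getD k ' ' = xs.getD (flipIdx s e k) ' ' := by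
  rw [applyFlip_eq_map xs s e hs he]
  by_cases hk : k < xs.length
  · rw [List.getD_eq_getElem?_getD, List.getElem?_map, List.getElem?_range hk, Option.map_some]
    rfl
  · have h1 : flipIdx s e k = k := by unfold flipIdx; rw [if_neg (by omega)]
    rw [h1, List.getD_eq_getElem?_getD, List.getD_eq_getElem?_getD,
      List.getElem?_eq_none (by simp; omega), List.getElem?_eq_none (by omega)]

-- composing: a reversed-foldl of flips on the index, unfolded at the head
theorem evalFlips_cons (se : Nat × Nat) (fl : List (Nat × Nat)) (i : Nat) :
    ((se :: fl).reverse).foldl (fun j p => flipIdx p.1 p.2 j) i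
      = flipIdx se.1 se.2 ((fl.reverse).foldl (fun j p => flipIdx p.1 p.2 j) i) := by
  rw [List.reverse_cons, List.foldl_append]
  rfl

-- applying a list of in-range flips equals one gather by the composed index map
theorem applyFlips_eq_map (fl : List (Nat × Nat)) (n : Nat) :
    ∀ (xs : List Char), xs.length = n → (∀ p ∈ fl, p.1 ≤ n ∧ p.2 ≤ n) →
    fl.foldl applyFlip xs
      = (List.range n).map
          (fun i => xs.getD ((fl.reverse).foldl (fun j p => flipIdx p.1 p.2 j) i) ' ') := by
  induction fl with
  | nil =>
    intro xs hx _
    subst hx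
    simp only [List.foldl_nil, List.reverse_nil]
    exact (range_map_getD xs).symm
  | cons se fl ih =>
    intro xs hx hb
    have hs : se.1 ≤ n := (hb se (by simp)).1
    have he : se.2 ≤ n := (hb se (by simp)).2
    have hx' : (applyFlip xs se).length = n := by
      rw [← hx] at hs he ⊢; exact length_applyFlip xs se.1 se.2 hs he
    rw [List.foldl_cons, ih (applyFlip xs se) hx' (fun p hp => hb p (by simp [hp]))]
    apply List.map_congr_left
    intro i _
    rw [evalFlips_cons]
    rw [← hx] at hs he
    exact getD_applyFlip xs se.1 se.2 hs he _

-- the flip-collection foldl only appends to its accumulator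
theorem foldl_flipStep_append (n : Nat) (level : Int) (rs : List (Int × Int × Int)) :
    ∀ (acc : List (Nat × Nat)),
    rs.foldl (fun acc r => if r.2.2 ≥ level then
        acc ++ [(PySem.List.clampIdx n r.1, PySem.List.clampIdx n (r.2.1 + 1))]
      else acc) acc
      = acc ++ rs.foldl (fun acc r => if r.2.2 ≥ level then
          acc ++ [(PySem.List.clampIdx n r.1, PySem.List.clampIdx n (r.2.1 + 1))]
        else acc) [] := by
  induction rs with
  | nil => intro acc; simp
  | cons r' rs' ih' =>
    intro acc
    simp only [List.foldl_cons]
    by_cases hq' : r'.2.2 ≥ level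
    · rw [if_pos hq', if_pos hq', ih' (acc ++ _), ih' ([] ++ _)]
      simp
    · rw [if_neg hq', if_neg hq']
      exact ih' acc

-- the runs loop at one level: array form vs flip-collection form
theorem runsPass_eq_applyFlips (runs : List (Int × Int × Int)) (level : Int) (n : Nat) :
    ∀ (xs : List Char), n = xs.length →
    runs.foldl (fun a r => if r.2.2 ≥ level then pyRevSlice a r.1 (r.2.1 + 1) else a) xs
      = (runs.foldl
          (fun acc r =>
            if r.2.2 ≥ level then
              acc ++ [(PySem.List.clampIdx n r.1, PySem.List.clampIdx n (r.2.1 + 1))]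
            else acc) []).foldl applyFlip xs := by
  induction runs with
  | nil => intro xs _; rfl
  | cons r rs ih =>
    intro xs hx
    simp only [List.foldl_cons]
    by_cases hq : r.2.2 ≥ level
    · rw [if_pos hq, if_pos hq, foldl_flipStep_append n level rs,
        List.foldl_append, List.nil_append, List.foldl_cons, List.foldl_nil]
      have hlen : n = (pyRevSlice xs r.1 (r.2.1 + 1)).length := by
        rw [pyRevSlice_eq_applyFlip,
          length_applyFlip _ _ _ (PySem.List.clampIdx_le _ _) (PySem.List.clampIdx_le _ _), hx]
      rw [ih _ hlen, pyRevSlice_eq_applyFlip, hx]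
    · rw [if_neg hq, if_neg hq, ih xs hx]

-- every collected flip bound is clamped, hence ≤ n (runs level)
theorem runFlips_bounded (n : Nat) (level : Int) (runs : List (Int × Int × Int)) :
    ∀ (acc : List (Nat × Nat)), (∀ p ∈ acc, p.1 ≤ n ∧ p.2 ≤ n) →
    ∀ p ∈ runs.foldl
        (fun acc r =>
          if r.2.2 ≥ level then
            acc ++ [(PySem.List.clampIdx n r.1, PySem.List.clampIdx n (r.2.1 + 1))]
          else acc) acc,
      p.1 ≤ n ∧ p.2 ≤ n := by
  induction runs with
  | nil => intro acc hacc; exact hacc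
  | cons r rs ih =>
    intro acc hacc
    simp only [List.foldl_cons]
    by_cases hq : r.2.2 ≥ level
    · rw [if_pos hq]
      apply ih
      intro p hp
      rcases List.mem_append.mp hp with h | h
      · exact hacc p h
      · rcases List.mem_singleton.mp h with rfl
        exact ⟨PySem.List.clampIdx_le _ _, PySem.List.clampIdx_le _ _⟩
    · rw [if_neg hq]; exact ih acc hacc

-- every collected flip bound is clamped, hence ≤ n (levels level)
theorem collectFlips_bounded (n : Nat) (runs : List (Int × Int × Int)) (lvls : List Int) :
    ∀ (acc : List (Nat × Nat)), (∀ p ∈ acc, p.1 ≤ n ∧ p.2 ≤ n) →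
    ∀ p ∈ lvls.foldl
        (fun acc level => runs.foldl
          (fun acc r =>
            if r.2.2 ≥ level then
              acc ++ [(PySem.List.clampIdx n r.1, PySem.List.clampIdx n (r.2.1 + 1))]
            else acc) acc) acc,
      p.1 ≤ n ∧ p.2 ≤ n := by
  induction lvls with
  | nil => intro acc hacc p hp; exact hacc p hp
  | cons l ls ih =>
    intro acc hacc
    exact ih _ (runFlips_bounded n l runs acc hacc)

-- a bounded flip list preserves length
theorem length_foldl_applyFlip (fl : List (Nat × Nat)) (n : Nat) :
    ∀ (xs : List Char), xs.length = n → (∀ p ∈ fl, p.1 ≤ n ∧ p.2 ≤ n) →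
    (fl.foldl applyFlip xs).length = n := by
  induction fl with
  | nil => intro xs hx _; exact hx
  | cons se fl ih =>
    intro xs hx hb
    rw [List.foldl_cons]
    apply ih
    · have hs : se.1 ≤ n := (hb se (by simp)).1
      have he : se.2 ≤ n := (hb se (by simp)).2
      rw [← hx] at hs he
      rw [length_applyFlip xs se.1 se.2 hs he, hx]
    · exact fun p hp => hb p (by simp [hp])

-- the levels foldl of the flip collector only appends to its accumulator
theorem foldl_levelStep_append (n : Nat) (runs : List (Int × Int × Int)) (lvls : List Int) :
    ∀ (acc : List (Nat × Nat)),
    lvls.foldl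
        (fun acc level => runs.foldl
          (fun acc r =>
            if r.2.2 ≥ level then
              acc ++ [(PySem.List.clampIdx n r.1, PySem.List.clampIdx n (r.2.1 + 1))]
            else acc) acc) acc
      = acc ++ lvls.foldl
          (fun acc level => runs.foldl
            (fun acc r =>
              if r.2.2 ≥ level then
                acc ++ [(PySem.List.clampIdx n r.1, PySem.List.clampIdx n (r.2.1 + 1))]
              else acc) acc) [] := by
  induction lvls with
  | nil => intro acc; simp
  | cons l ls ih =>
    intro acc
    simp only [List.foldl_cons]
    rw [foldl_flipStep_append n l runs acc, ih (acc ++ _)]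
    conv_rhs => rw [ih _]
    simp

-- the whole odd-levels pass: array form vs collected flips
theorem levelsPass_eq_applyFlips (runs : List (Int × Int × Int)) (n : Nat) (lvls : List Int) :
    ∀ (xs : List Char), xs.length = n →
    lvls.foldl
        (fun a l => runs.foldl (fun a r => if r.2.2 ≥ l then pyRevSlice a r.1 (r.2.1 + 1) else a) a)
        xs
      = (lvls.foldl
          (fun acc level => runs.foldl
            (fun acc r =>
              if r.2.2 ≥ level then
                acc ++ [(PySem.List.clampIdx n r.1, PySem.List.clampIdx n (r.2.1 + 1))]
              else acc) acc) []).foldl applyFlip xs := by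
  induction lvls with
  | nil => intro xs _; rfl
  | cons l ls ih =>
    intro xs hx
    simp only [List.foldl_cons]
    rw [foldl_levelStep_append n runs ls, List.foldl_append,
      runsPass_eq_applyFlips runs l n xs hx.symm]
    apply ih
    exact length_foldl_applyFlip _ n xs hx (runFlips_bounded n l runs [] (by simp))

-- ===== VERDICT (by name: the statement is the Claim_ definition above) =====
theorem reorder_text_py_spec : Claim_equal_reorder_text_py := by
  intro text runs levels _ hpre
  unfold Spec_reorder_text_py reorder_text_py reorder_text_py_alt
  obtain ⟨x, ls, rfl⟩ : ∃ x ls, levels = x :: ls := by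
    cases levels with
    | nil => exact absurd rfl hpre
    | cons x ls => exact ⟨x, ls, rfl⟩
  obtain ⟨m, hm⟩ := Option.isSome_iff_exists.mp (max?_cons_isSome x ls)
  rw [hm]
  simp only [collectFlips]
  rw [fold_all_levels_eq_fold_odd runs ((m + 1).toNat) m rfl text.toList,
    levelsPass_eq_applyFlips runs text.toList.length _ text.toList rfl,
    applyFlips_eq_map _ text.toList.length text.toList rfl
      (collectFlips_bounded text.toList.length runs _ [] (by simp))]
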